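-- pv_equiv track=rewrite | github.com/cemililik/ForgeLM | tools/build_usermanuals.py | preprocess_mermaid
-- ===== SOURCE A (Python) =====
-- def preprocess_mermaid(text: str) -> str:
--     """Replace ```` ```mermaid ```` fences with raw ``<div class="mermaid">`` blocks.
--
--     The markdown processor would otherwise wrap the content in ``<pre><code>``
--     and HTML-escape it, which breaks the mermaid.js parser. Pre-extracting the
--     block keeps the diagram source intact for client-side rendering.
--     """
--     out: list[str] = []
--     in_block = False
--     body_lines: list[str] = []
--     for line in text.splitlines():
--         stripped = line.rstrip()
--         if not in_block:
--             if stripped == "```mermaid":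
--                 in_block = True
--                 body_lines = []
--                 continue
--             out.append(line)
--         else:
--             if stripped == "```":
--                 out.append("")
--                 out.append('<div class="mermaid">')
--                 out.extend(body_lines)
--                 out.append("</div>")
--                 out.append("")
--                 in_block = False
--                 body_lines = []
--                 continue
--             body_lines.append(line)
--
--     if in_block:
--         out.append("```mermaid")
--         out.extend(body_lines)
--
--     return "\n".join(out)
-- ===== SOURCE B (Python) =====
-- def preprocess_mermaid(text: str) -> str:
--     """Replace ```mermaid fences with raw <div class="mermaid"> blocks.
--
--     Index-based rewrite: walk the lines with an explicit cursor and, on an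
--     opening fence, scan forward for the matching close.
--     """
--     lines = text.splitlines()
--     out: list[str] = []
--     i = 0
--     n = len(lines)
--     while i < n:
--         line = lines[i]
--         if line.rstrip() == "```mermaid":
--             j = i + 1
--             while j < n and lines[j].rstrip() != "```":
--                 j += 1
--             if j < n:
--                 out.append("")
--                 out.append('<div class="mermaid">')
--                 out.extend(lines[i + 1 : j])
--                 out.append("</div>")
--                 out.append("")
--                 i = j + 1
--             else:
--                 out.append("```mermaid")
--                 out.extend(lines[i + 1 :])
--                 i = n
--         else:
--             out.append(line)
--             i += 1
--     return "\n".join(out)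
-- ===== Notes on version B (the rewrite author's own statement) =====
-- stated objective: alternative
-- what changed: Replaces A's single-pass boolean state machine (in_block flag with a pending body buffer and a trailing flush) by an explicit cursor over the line list that, at each opening fence, scans forward for the matching closing fence and emits the whole block at once.
import Mathlib
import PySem

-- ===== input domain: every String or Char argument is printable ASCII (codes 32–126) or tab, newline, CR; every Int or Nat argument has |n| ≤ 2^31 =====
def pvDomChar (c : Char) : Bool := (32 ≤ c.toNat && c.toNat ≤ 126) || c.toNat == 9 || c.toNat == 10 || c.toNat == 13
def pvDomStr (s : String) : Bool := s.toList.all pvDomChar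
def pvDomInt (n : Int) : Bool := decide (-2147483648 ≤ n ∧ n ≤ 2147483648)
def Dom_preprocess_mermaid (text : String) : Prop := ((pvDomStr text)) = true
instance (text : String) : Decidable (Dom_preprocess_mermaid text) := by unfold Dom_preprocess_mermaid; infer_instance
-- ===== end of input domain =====

-- B changes the decomposition, not the behaviour: an explicit cursor with a forward scan for the
-- closing fence replaces A's one-pass boolean state machine (objective: alternative, same cost).

-- ===== PORT A =====
-- A's for-loop as structural recursion over the lines, carrying (out, in_block, body_lines);
-- the trailing 'if in_block' check is performed when the line list is exhausted.
def pmLoopA : List String → List String → Bool → List String → List String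
  | [], out, inb, body => if inb then out ++ ("```mermaid" :: body) else out
  | l :: ls, out, inb, body =>
    let stripped := PySem.Str.rstrip l
    if !inb then
      if stripped = "```mermaid" then pmLoopA ls out true []
      else pmLoopA ls (out ++ [l]) inb body
    else
      if stripped = "```" then
        pmLoopA ls (out ++ ["", "<div class=\"mermaid\">"] ++ body ++ ["</div>", ""]) false []
      else pmLoopA ls out inb (body ++ [l])

def preprocess_mermaid (text : String) : String :=
  PySem.Str.join "\n" (pmLoopA (PySem.Str.splitlines text) [] false [])

-- ===== PORT B =====
-- B's inner while-loop: scan forward for the first line whose rstrip is "```";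
-- returns (body lines before it, lines after it), or none if never found.
def pmScanClose : List String → Option (List String × List String)
  | [] => none
  | l :: ls =>
    if PySem.Str.rstrip l = "```" then some ([], ls)
    else
      match pmScanClose ls with
      | some (body, rest) => some (l :: body, rest)
      | none => none

theorem pmScanClose_length : ∀ (ls body rest : List String),
    pmScanClose ls = some (body, rest) → rest.length < ls.length := by
  intro ls
  induction ls with
  | nil => intro body rest h; simp [pmScanClose] at h
  | cons l ls ih =>
    intro body rest h
    by_cases hc : PySem.Str.rstrip l = "```"
    · simp [pmScanClose, hc] at h
      simp [← h.2]
    · simp only [pmScanClose, if_neg hc] at h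
      cases hsc : pmScanClose ls with
      | none => rw [hsc] at h; simp at h
      | some p =>
        rw [hsc] at h; simp at h
        have := ih p.1 p.2 (by rw [hsc])
        rw [← h.2]; simp; omega

-- B's outer while-loop over the cursor, as recursion on the remaining lines.
def pmGoB : List String → List String
  | [] => []
  | l :: ls =>
    if PySem.Str.rstrip l = "```mermaid" then
      match hsc : pmScanClose ls with
      | some (body, rest) =>
        "" :: "<div class=\"mermaid\">" :: (body ++ "</div>" :: "" :: pmGoB rest)
      | none => "```mermaid" :: ls
    else l :: pmGoB ls
  termination_by ls => ls.length
  decreasing_by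
  · have := pmScanClose_length ls body rest hsc; simp; omega
  · simp

def preprocess_mermaid_alt (text : String) : String :=
  PySem.Str.join "\n" (pmGoB (PySem.Str.splitlines text))

-- ===== PRECONDITION & SPEC =====
def Spec_preprocess_mermaid (text : String) (out : String) : Prop := out = preprocess_mermaid_alt text
instance (text : String) (out : String) : Decidable (Spec_preprocess_mermaid text out) := by unfold Spec_preprocess_mermaid; infer_instance

-- ===== CLAIM (what is proved, stated in full; the proofs are below) =====
def Claim_equal_preprocess_mermaid : Prop := ∀ (text : String), Dom_preprocess_mermaid text → Spec_preprocess_mermaid text (preprocess_mermaid text)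

-- ===== LEMMAS AND PROOFS =====

-- What A's loop computes, in B's terms, for both loop states at once
-- (strong induction on the line count; the two states call into each other).
theorem pmLoop_eq : ∀ (n : Nat) (ls : List String), ls.length ≤ n →
    (∀ out, pmLoopA ls out false [] = out ++ pmGoB ls) ∧
    (∀ out body, pmLoopA ls out true body =
      match pmScanClose ls with
      | some (b, rest) =>
          out ++ ["", "<div class=\"mermaid\">"] ++ (body ++ b) ++ ["</div>", ""] ++ pmGoB rest
      | none => out ++ "```mermaid" :: (body ++ ls)) := by
  intro n
  induction n with
  | zero =>
    intro ls hl
    have : ls = [] := List.eq_nil_of_length_eq_zero (Nat.le_zero.mp hl)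
    subst this
    constructor
    · intro out; simp [pmLoopA, pmGoB]
    · intro out body; simp [pmLoopA, pmScanClose]
  | succ n ih =>
    intro ls hl
    cases ls with
    | nil =>
      constructor
      · intro out; simp [pmLoopA, pmGoB]
      · intro out body; simp [pmLoopA, pmScanClose]
    | cons l ls =>
      have hls : ls.length ≤ n := by simp at hl; omega
      constructor
      · intro out
        by_cases hm : PySem.Str.rstrip l = "```mermaid"
        · rw [show pmLoopA (l :: ls) out false [] = pmLoopA ls out true [] by
            simp [pmLoopA, hm]]
          rw [(ih ls hls).2 out []]
          rw [pmGoB]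
          cases hsc : pmScanClose ls with
          | some p =>
            cases p with
            | mk b rest => simp [hm]
          | none => simp [hm]
        · rw [show pmLoopA (l :: ls) out false [] = pmLoopA ls (out ++ [l]) false [] by
            simp [pmLoopA, hm]]
          rw [((ih ls hls).1 (out ++ [l]))]
          rw [pmGoB]; simp [hm]
      · intro out body
        by_cases hc : PySem.Str.rstrip l = "```"
        · rw [show pmLoopA (l :: ls) out true body =
              pmLoopA ls (out ++ ["", "<div class=\"mermaid\">"] ++ body ++ ["</div>", ""]) false [] by
            simp [pmLoopA, hc]]
          rw [((ih ls hls).1 _)]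
          simp [pmScanClose, hc]
        · rw [show pmLoopA (l :: ls) out true body = pmLoopA ls out true (body ++ [l]) by
            simp [pmLoopA, hc]]
          rw [(ih ls hls).2 out (body ++ [l])]
          simp only [pmScanClose, if_neg hc]
          cases hsc : pmScanClose ls with
          | some p =>
            cases p with
            | mk b rest => simp
          | none => simp

-- ===== VERDICT (by name: the statement is the Claim_ definition above) =====
theorem preprocess_mermaid_spec : Claim_equal_preprocess_mermaid := by
  intro text _
  unfold Spec_preprocess_mermaid preprocess_mermaid preprocess_mermaid_alt
  rw [(pmLoop_eq (PySem.Str.splitlines text).length _ le_rfl).1 []]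
  simp
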